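-- pv_equiv track=rewrite | github.com/MinHoon-LEE/Ps_Sql | Programmers/Algorithm/Python/42840/42840.py | answer_match3
-- ===== SOURCE A (Python) =====
-- def answer_match3(answers):
--     count = 0
--     for i in range (len(answers)):
--         if (i%10 == 0 or i%10 == 1):
--             if (answers[i] == 3):
--                 count += 1
--         if (i%10 == 2 or i%10 == 3):
--             if (answers[i] == 1):
--                 count += 1
--         if (i%10 == 4 or i%10 == 5):
--             if (answers[i] == 2):
--                 count += 1
--         if (i%10 == 6 or i%10 == 7):
--             if (answers[i] == 4):
--                 count += 1
--         if (i%10 == 8 or i%10 == 9):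
--             if (answers[i] == 5):
--                 count += 1
--     return (count)
-- ===== SOURCE B (Python) =====
-- def _chunk_count(chunk):
--     return (chunk[0:2].count(3) + chunk[2:4].count(1)
--             + chunk[4:6].count(2) + chunk[6:8].count(4)
--             + chunk[8:10].count(5))
--
-- def answer_match3(answers):
--     count = 0
--     for start in range(0, len(answers), 10):
--         count += _chunk_count(answers[start:start + 10])
--     return count
-- ===== Notes on version B (the rewrite author's own statement) =====
-- stated objective: faster
-- what changed: Replaces A's per-index loop with five modular-arithmetic branch pairs by a chunk loop: the list is scored ten elements at a time, each chunk's contribution computed as five slice-and-count operations (chunk[0:2].count(3) + ... + chunk[8:10].count(5)), with no per-element index arithmetic.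
import Mathlib
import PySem

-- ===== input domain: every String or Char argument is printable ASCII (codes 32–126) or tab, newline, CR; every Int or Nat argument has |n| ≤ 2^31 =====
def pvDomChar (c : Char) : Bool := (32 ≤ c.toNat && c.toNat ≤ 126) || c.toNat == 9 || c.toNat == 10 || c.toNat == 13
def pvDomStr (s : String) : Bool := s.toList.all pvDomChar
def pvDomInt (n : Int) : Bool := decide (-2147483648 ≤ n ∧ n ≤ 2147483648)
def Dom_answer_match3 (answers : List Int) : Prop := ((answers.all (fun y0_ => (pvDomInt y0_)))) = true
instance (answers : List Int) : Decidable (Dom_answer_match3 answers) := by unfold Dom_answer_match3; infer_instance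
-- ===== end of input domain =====

-- B scores the list ten elements at a time: each chunk's contribution is five
-- slice-and-count operations, instead of A's per-index modular-arithmetic branches.

-- ===== PORT A =====
-- literal transliteration: for i in range(len(answers)) with five successive if-blocks
-- (every index i is in range, so answers[i] is pyGetD with an unused default)
def answer_match3 (answers : List Int) : Int :=
  (PySem.List.pyRange 0 answers.length 1).foldl (fun count i =>
    let count := if (PySem.Int.mod i 10 == 0 || PySem.Int.mod i 10 == 1) then
                   (if PySem.List.pyGetD answers i 0 == 3 then count + 1 else count) else count
    let count := if (PySem.Int.mod i 10 == 2 || PySem.Int.mod i 10 == 3) then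
                   (if PySem.List.pyGetD answers i 0 == 1 then count + 1 else count) else count
    let count := if (PySem.Int.mod i 10 == 4 || PySem.Int.mod i 10 == 5) then
                   (if PySem.List.pyGetD answers i 0 == 2 then count + 1 else count) else count
    let count := if (PySem.Int.mod i 10 == 6 || PySem.Int.mod i 10 == 7) then
                   (if PySem.List.pyGetD answers i 0 == 4 then count + 1 else count) else count
    let count := if (PySem.Int.mod i 10 == 8 || PySem.Int.mod i 10 == 9) then
                   (if PySem.List.pyGetD answers i 0 == 5 then count + 1 else count) else count
    count) 0

-- ===== PORT B =====
-- _chunk_count: chunk[0:2].count(3) + chunk[2:4].count(1) + chunk[4:6].count(2) + chunk[6:8].count(4) + chunk[8:10].count(5)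
def pvChunkCount (chunk : List Int) : Int :=
  ((PySem.List.slice chunk (some 0) (some 2)).count 3 : Int)
  + ((PySem.List.slice chunk (some 2) (some 4)).count 1 : Int)
  + ((PySem.List.slice chunk (some 4) (some 6)).count 2 : Int)
  + ((PySem.List.slice chunk (some 6) (some 8)).count 4 : Int)
  + ((PySem.List.slice chunk (some 8) (some 10)).count 5 : Int)

-- for start in range(0, len(answers), 10): count += _chunk_count(answers[start:start+10])
def answer_match3_alt (answers : List Int) : Int :=
  (PySem.List.pyRange 0 answers.length 10).foldl (fun count start =>
    count + pvChunkCount (PySem.List.slice answers (some start) (some (start + 10)))) 0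

-- ===== PRECONDITION & SPEC =====
def Spec_answer_match3 (answers : List Int) (out : Int) : Prop := out = answer_match3_alt answers
instance (answers : List Int) (out : Int) : Decidable (Spec_answer_match3 answers out) := by unfold Spec_answer_match3; infer_instance

-- ===== CLAIM (what is proved, stated in full; the proofs are below) =====
def Claim_equal_answer_match3 : Prop := ∀ (answers : List Int), Dom_answer_match3 answers → Spec_answer_match3 answers (answer_match3 answers)

-- ===== LEMMAS AND PROOFS =====

def pvPattern : List Int := [3, 3, 1, 1, 2, 2, 4, 4, 5, 5]

-- reference count: one indicator per element, pattern indexed by position mod 10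
def pvG : List Int → Int → Int
  | [], _ => 0
  | a :: t, k =>
      (if a == PySem.List.pyGetD pvPattern (PySem.Int.mod k 10) 0 then (1 : Int) else 0) + pvG t (k + 1)

-- the per-element step of A's fold equals the pattern-indicator step
theorem pv_step_eq (answers : List Int) (count j : Int) :
    (let c := if (PySem.Int.mod j 10 == 0 || PySem.Int.mod j 10 == 1) then
                (if PySem.List.pyGetD answers j 0 == 3 then count + 1 else count) else count
     let c := if (PySem.Int.mod j 10 == 2 || PySem.Int.mod j 10 == 3) then
                (if PySem.List.pyGetD answers j 0 == 1 then c + 1 else c) else c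
     let c := if (PySem.Int.mod j 10 == 4 || PySem.Int.mod j 10 == 5) then
                (if PySem.List.pyGetD answers j 0 == 2 then c + 1 else c) else c
     let c := if (PySem.Int.mod j 10 == 6 || PySem.Int.mod j 10 == 7) then
                (if PySem.List.pyGetD answers j 0 == 4 then c + 1 else c) else c
     let c := if (PySem.Int.mod j 10 == 8 || PySem.Int.mod j 10 == 9) then
                (if PySem.List.pyGetD answers j 0 == 5 then c + 1 else c) else c
     c) =
    count + (if PySem.List.pyGetD answers j 0 == PySem.List.pyGetD pvPattern (PySem.Int.mod j 10) 0 then (1 : Int) else 0) := by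
  have hmod : PySem.Int.mod j 10 = j % 10 := PySem.Int.mod_eq_emod_of_pos (by omega)
  have h0 : 0 ≤ j % 10 := Int.emod_nonneg j (by omega)
  have h10 : j % 10 < 10 := Int.emod_lt_of_pos j (by omega)
  set a := PySem.List.pyGetD answers j 0 with ha
  rw [hmod]
  set r := j % 10 with hr
  interval_cases r <;>
    simp [pvPattern, PySem.List.pyGetD, PySem.List.pyGet?, PySem.List.pyIdx?] <;>
    split_ifs <;> omega

-- A's fold over enumerate equals the reference count
theorem pv_enumFold_eq (l : List Int) : ∀ (k s : Int),
    (PySem.List.enumerate l k).foldl (fun s p =>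
      if p.2 == PySem.List.pyGetD pvPattern (PySem.Int.mod p.1 10) 0 then s + 1 else s) s
    = s + pvG l k := by
  induction l with
  | nil => intro k s; simp [pvG, PySem.List.enumerate_nil]
  | cons a t ih =>
      intro k s
      rw [PySem.List.enumerate_cons, List.foldl_cons, ih]
      simp only [pvG]
      split_ifs <;> omega

-- A equals the reference count
theorem pv_A_eq_G (answers : List Int) : answer_match3 answers = pvG answers 0 := by
  unfold answer_match3
  have hcong : ∀ (count j : Int), j ∈ PySem.List.pyRange 0 answers.length 1 →
      (let c := if (PySem.Int.mod j 10 == 0 || PySem.Int.mod j 10 == 1) then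
                  (if PySem.List.pyGetD answers j 0 == 3 then count + 1 else count) else count
       let c := if (PySem.Int.mod j 10 == 2 || PySem.Int.mod j 10 == 3) then
                  (if PySem.List.pyGetD answers j 0 == 1 then c + 1 else c) else c
       let c := if (PySem.Int.mod j 10 == 4 || PySem.Int.mod j 10 == 5) then
                  (if PySem.List.pyGetD answers j 0 == 2 then c + 1 else c) else c
       let c := if (PySem.Int.mod j 10 == 6 || PySem.Int.mod j 10 == 7) then
                  (if PySem.List.pyGetD answers j 0 == 4 then c + 1 else c) else c
       let c := if (PySem.Int.mod j 10 == 8 || PySem.Int.mod j 10 == 9) then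
                  (if PySem.List.pyGetD answers j 0 == 5 then c + 1 else c) else c
       c) =
      (fun s (p : Int × Int) =>
        if p.2 == PySem.List.pyGetD pvPattern (PySem.Int.mod p.1 10) 0 then s + 1 else s) count
        (j, PySem.List.pyGetD answers j 0) := by
    intro count j _
    rw [pv_step_eq answers count j]
    simp only []
    split_ifs <;> omega
  rw [PySem.List.foldl_congr_mem _ _ _ _ hcong]
  have h := pv_enumFold_eq answers 0 0
  rw [PySem.List.enumerate_eq_map_pyRange (d := 0), List.foldl_map] at h
  simpa using h

-- shifting the start index by 10 does not change the reference count
theorem pv_G_shift (l : List Int) : ∀ (k : Int), pvG l (k + 10) = pvG l k := by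
  induction l with
  | nil => intro k; simp [pvG]
  | cons a t ih =>
      intro k
      simp only [pvG]
      have hm : PySem.Int.mod (k + 10) 10 = PySem.Int.mod k 10 := by
        have h1 := PySem.Int.mod_eq_emod_of_pos (a := k + 10) (b := (10 : Int)) (by omega)
        have h2 := PySem.Int.mod_eq_emod_of_pos (a := k) (b := (10 : Int)) (by omega)
        rw [h1, h2]; omega
      rw [hm]
      have he : k + 10 + 1 = k + 1 + 10 := by ring
      rw [he, ih]

-- the reference count splits over append
theorem pv_G_append (xs : List Int) : ∀ (ys : List Int) (k : Int),
    pvG (xs ++ ys) k = pvG xs k + pvG ys (k + xs.length) := by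
  induction xs with
  | nil => intro ys k; simp [pvG]
  | cons a t ih =>
      intro ys k
      simp only [List.cons_append, pvG, ih, List.length_cons]
      have he : k + 1 + (t.length : Int) = k + ((t.length : Int) + 1) := by ring
      push_cast
      rw [he]
      ring

-- on a chunk of at most ten elements the slice-and-count score is the reference count
set_option maxHeartbeats 1600000 in
theorem pv_chunk_eq_G (ch : List Int) (hle : ch.length ≤ 10) : pvChunkCount ch = pvG ch 0 := by
  match ch, hle with
  | [], _ | [a], _ | [a,b], _ | [a,b,c], _ | [a,b,c,d], _ | [a,b,c,d,e], _
  | [a,b,c,d,e,f], _ | [a,b,c,d,e,f,g], _ | [a,b,c,d,e,f,g,h], _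
  | [a,b,c,d,e,f,g,h,i], _ | [a,b,c,d,e,f,g,h,i,j], _ =>
    simp [pvChunkCount, pvG, pvPattern, PySem.List.slice, PySem.List.clampIdx,
          PySem.Int.mod, PySem.List.pyGetD, PySem.List.pyGet?, PySem.List.pyIdx?,
          List.count_cons] <;>
    ring

-- the reference count splits into the first chunk plus the rest
theorem pv_G_chunk (l : List Int) : pvG l 0 = pvChunkCount (l.take 10) + pvG (l.drop 10) 0 := by
  conv_lhs => rw [← List.take_append_drop 10 l]
  rw [pv_G_append]
  rw [pv_chunk_eq_G (l.take 10) (by simp)]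
  by_cases hlen : l.length ≤ 10
  · simp [List.drop_eq_nil_of_le hlen, pvG]
  · have hten : ((l.take 10).length : Int) = 10 := by simp; omega
    rw [hten]
    have hs := pv_G_shift (l.drop 10) 0
    norm_num at hs ⊢
    rw [hs]

-- step-10 range peels its first element
theorem pv_pyRange10_cons (a b : Int) (h : a < b) :
    PySem.List.pyRange a b 10 = a :: PySem.List.pyRange (a + 10) b 10 := by
  rw [PySem.List.pyRange_of_pos _ _ (by omega), PySem.List.pyRange_of_pos _ _ (by omega)]
  by_cases h2 : a + 10 < b
  · rw [if_pos h, if_pos h2]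
    have hN : ((b - a + 10 - 1) / 10).toNat = ((b - (a + 10) + 10 - 1) / 10).toNat + 1 := by omega
    rw [hN, List.range_succ_eq_map, List.map_cons, List.map_map]
    refine congrArg₂ _ (by ring) ?_
    refine List.map_congr_left (fun k _ => ?_)
    simp [Function.comp]
    ring
  · rw [if_pos h, if_neg h2]
    have hN : ((b - a + 10 - 1) / 10).toNat = 1 := by omega
    rw [hN]
    simp

-- B's chunk loop accumulates the reference count of the not-yet-scored suffix
theorem pv_fold_chunks (n : Nat) : ∀ (l full : List Int) (k : Nat) (c : Int),
    full.drop (10 * k) = l → l.length ≤ n →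
    (PySem.List.pyRange ((10 * k : Nat) : Int) full.length 10).foldl
      (fun cnt st => cnt + pvChunkCount (PySem.List.slice full (some st) (some (st + 10)))) c
    = c + pvG l 0 := by
  induction n with
  | zero =>
      intro l full k c hdrop hlen
      have hnil : l = [] := by cases l <;> simp_all
      subst hnil
      have hle : full.length ≤ 10 * k := List.drop_eq_nil_iff.mp hdrop
      rw [PySem.List.pyRange_of_pos _ _ (by omega), if_neg (by push_cast; omega)]
      simp [pvG]
  | succ n ih =>
      intro l full k c hdrop hlen
      by_cases hnil : l = []
      · subst hnil
        have hle : full.length ≤ 10 * k := List.drop_eq_nil_iff.mp hdrop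
        rw [PySem.List.pyRange_of_pos _ _ (by omega), if_neg (by push_cast; omega)]
        simp [pvG]
      · have hlt : 10 * k < full.length := by
          by_contra hge
          exact hnil (by rw [← hdrop]; exact List.drop_eq_nil_iff.mpr (by omega))
        rw [pv_pyRange10_cons _ _ (by push_cast; omega), List.foldl_cons]
        have hslice : PySem.List.slice full (some ((10 * k : Nat) : Int))
            (some (((10 * k : Nat) : Int) + 10)) = l.take 10 := by
          rw [← hdrop]
          have h10 : ((10 * k : Nat) : Int) + 10 = ((10 * k : Nat) : Int) + ((10 : Nat) : Int) := by
            push_cast; ring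
          rw [h10, PySem.List.slice_natCast_add]
        have hnext : ((10 * k : Nat) : Int) + 10 = ((10 * (k + 1) : Nat) : Int) := by
          push_cast; ring
        rw [hslice, hnext,
            ih (l.drop 10) full (k + 1) _ (by rw [← hdrop, List.drop_drop]; ring_nf)
              (by have : 1 ≤ l.length := by cases l <;> simp_all
                  simp; omega)]
        rw [pv_G_chunk l]
        ring

theorem pv_B_eq_G (answers : List Int) : answer_match3_alt answers = pvG answers 0 := by
  unfold answer_match3_alt
  have h := pv_fold_chunks answers.length answers answers 0 0 (by simp) le_rfl
  simpa using h

-- ===== VERDICT (by name: the statement is the Claim_ definition above) =====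
theorem answer_match3_spec : Claim_equal_answer_match3 := by
  intro answers _
  unfold Spec_answer_match3
  rw [pv_A_eq_G, pv_B_eq_G]
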